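-- pv_equiv track=rewrite | github.com/Krugger1982/24_1_squirrel | salary.py | SynchronizingTables
-- ===== SOURCE A (Python) =====
-- def sortlist(x):
--     k = 1
--     L = len(x)
--     while k > 0 :
--         k = 0
--         for i in range (L-1) :
--             if x[i] > x[i+1] :
--                 x[i], x[i+1] = x[i+1], x[i]
--                 k += 1
--     return x
--
-- def SynchronizingTables (N, ids, salary):
--     ids2 = []
--     # Creating copy of list "ids"
--     for i in range (N):             # create a copy of the array  "ids"
--         ids2.append(ids[i])
--     ids2 = sortlist(ids2)           # sorting ids2  in ascending order
--     salary = sortlist(salary)       # sorting salary  in ascending order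
--     salary2 = []
--     for i in range (N):
--         for j in range (N):
--             if ids[i] == ids2[j]:
--                 salary2.append(salary[j])
--     return salary2
-- ===== SOURCE B (Python) =====
-- def SynchronizingTables(N, ids, salary):
--     salary.sort()
--     prefix = ids[:N]
--     salary2 = []
--     for v in prefix:
--         lo = len([x for x in prefix if x < v])
--         eq = len([x for x in prefix if x == v])
--         salary2 += salary[lo:lo + eq]
--     return salary2
-- ===== Notes on version B (the rewrite author's own statement) =====
-- stated objective: simpler
-- what changed: Instead of hand-bubble-sorting a copy of ids and scanning the sorted copy for equality matches, B computes each id's rank directly (count of strictly smaller ids gives the start, count of equal ids the width of its block in the sorted salary list) and emits the corresponding slice of the sorted salaries; the hand-written quadratic bubble sort is replaced by the built-in sort (constant-factor speedup measured).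
-- outside the precondition, e.g. on SynchronizingTables(-1, [1, 2], [4, 3]): A returns [], B returns [3]; on SynchronizingTables(3, [1, 2], [4, 3]): A raises IndexError, B returns [3, 4]
import Mathlib
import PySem

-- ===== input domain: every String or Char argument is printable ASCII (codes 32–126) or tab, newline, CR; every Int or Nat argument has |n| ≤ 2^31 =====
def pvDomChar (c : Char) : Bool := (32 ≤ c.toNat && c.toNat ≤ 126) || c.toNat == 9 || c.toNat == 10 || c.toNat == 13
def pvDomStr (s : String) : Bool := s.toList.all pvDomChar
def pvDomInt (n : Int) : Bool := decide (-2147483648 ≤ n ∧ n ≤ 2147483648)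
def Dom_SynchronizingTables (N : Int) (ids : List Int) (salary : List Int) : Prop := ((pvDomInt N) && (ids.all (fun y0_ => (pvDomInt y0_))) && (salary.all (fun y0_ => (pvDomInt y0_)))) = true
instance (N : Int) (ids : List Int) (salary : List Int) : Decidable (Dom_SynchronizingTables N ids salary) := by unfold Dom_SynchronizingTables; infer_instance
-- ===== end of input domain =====

-- B replaces A's bubble-sorted copy of ids and its equality-matching inner scan by direct rank
-- counting into the sorted salary list (objective: simpler). Both Pythons sort `salary` in place
-- (A via its bubble sort, B via .sort()); the equivalence proved here is about the return value.

-- ===== PORT A =====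
-- one 'for i in range(L-1)' pass of sortlist: the list after the adjacent swaps, and the swap count k
def bubblePass : List Int → List Int × Nat
  | [] => ([], 0)
  | [a] => ([a], 0)
  | a :: b :: t =>
    if b < a then
      let r := bubblePass (a :: t)
      (b :: r.1, r.2 + 1)
    else
      let r := bubblePass (b :: t)
      (a :: r.1, r.2)
termination_by x => x.length
decreasing_by all_goals simp

-- number of inversions; used only as provably sufficient fuel for the while-loop below
def invCount : List Int → Nat
  | [] => 0
  | a :: t => t.countP (fun b => decide (b < a)) + invCount t

-- the 'while k > 0' loop of sortlist (fuel merely makes it total; each pass removes exactly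
-- its swap count from invCount, so invCount x + 1 passes always reach k = 0 — see the lemmas)
def bubbleLoop : Nat → List Int → List Int
  | 0, x => x
  | Nat.succ f, x =>
    let r := bubblePass x
    if 0 < r.2 then bubbleLoop f r.1 else r.1

def sortlist (x : List Int) : List Int := bubbleLoop (invCount x + 1) x

def SynchronizingTables (N : Int) (ids : List Int) (salary : List Int) : List Int :=
  let ids2 := (PySem.List.pyRange 0 N 1).foldl (fun acc i => acc ++ [PySem.List.pyGetD ids i 0]) []
  let ids2s := sortlist ids2
  let salaryS := sortlist salary
  (PySem.List.pyRange 0 N 1).foldl (fun acc i =>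
    (PySem.List.pyRange 0 N 1).foldl (fun acc2 j =>
      if PySem.List.pyGetD ids i 0 == PySem.List.pyGetD ids2s j 0 then
        acc2 ++ [PySem.List.pyGetD salaryS j 0]
      else acc2) acc) []

-- ===== PORT B =====
def SynchronizingTables_alt (N : Int) (ids : List Int) (salary : List Int) : List Int :=
  let salaryS := PySem.List.sorted salary (fun x => x) false
  let pfx := PySem.List.slice ids none (some N)
  pfx.foldl (fun salary2 v =>
    let lo : Int := ((pfx.filter (fun x => decide (x < v))).length : Int)
    let eq : Int := ((pfx.filter (fun x => x == v)).length : Int)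
    salary2 ++ PySem.List.slice salaryS (some lo) (some (lo + eq))) []

-- ===== PRECONDITION & SPEC =====
-- Pre_ restricts to the natural domain of a table size N: 0 ≤ N and both tables have at least N rows.
-- It excludes negative N (not a table size; there A happens to return [] while B's slice ids[:N] counts
-- from the end) and N larger than a list length (there A raises IndexError).
def Pre_SynchronizingTables (N : Int) (ids : List Int) (salary : List Int) : Prop :=
  0 ≤ N ∧ N ≤ ids.length ∧ N ≤ salary.length
instance (N : Int) (ids : List Int) (salary : List Int) : Decidable (Pre_SynchronizingTables N ids salary) := by unfold Pre_SynchronizingTables; infer_instance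

def pvWitness_SynchronizingTables : Int × List Int × List Int := (2, [2, 1], [5, 3])

def Spec_SynchronizingTables (N : Int) (ids : List Int) (salary : List Int) (out : List Int) : Prop := out = SynchronizingTables_alt N ids salary
instance (N : Int) (ids : List Int) (salary : List Int) (out : List Int) : Decidable (Spec_SynchronizingTables N ids salary out) := by unfold Spec_SynchronizingTables; infer_instance

-- ===== CLAIM (what is proved, stated in full; the proofs are below) =====
def Claim_equal_SynchronizingTables : Prop := ∀ (N : Int) (ids : List Int) (salary : List Int), Dom_SynchronizingTables N ids salary → Pre_SynchronizingTables N ids salary → Spec_SynchronizingTables N ids salary (SynchronizingTables N ids salary)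

-- ===== LEMMAS AND PROOFS =====

lemma bubblePass_perm (x : List Int) : (bubblePass x).1.Perm x := by
  fun_induction bubblePass x with
  | case1 => simp
  | case2 => simp
  | case3 a b t h r ih => exact (ih.cons b).trans (List.Perm.swap a b t)
  | case4 a b t h r ih => exact ih.cons a

lemma invCount_bubblePass (x : List Int) : invCount (bubblePass x).1 + (bubblePass x).2 = invCount x := by
  fun_induction bubblePass x with
  | case1 => simp [invCount]
  | case2 => simp [invCount]
  | case3 a b t h r ih =>
    have hr : r = bubblePass (a :: t) := rfl
    rw [hr] at *
    have hc := (bubblePass_perm (a :: t)).countP_congr (p := fun x => decide (x < b)) (fun x _ => rfl)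
    simp only [invCount, List.countP_cons] at *
    have hab : decide (b < a) = true := by simpa using h
    have hba : decide (a < b) = false := by simp; omega
    simp only [hab, hba] at *
    simp at *
    omega
  | case4 a b t h r ih =>
    have hr : r = bubblePass (b :: t) := rfl
    rw [hr] at *
    have hc := (bubblePass_perm (b :: t)).countP_congr (p := fun x => decide (x < a)) (fun x _ => rfl)
    simp only [invCount, List.countP_cons] at *
    have hba : decide (b < a) = false := by simp; omega
    simp only [hba] at *
    simp at *
    omega

lemma bubblePass_zero_eq (x : List Int) (h : (bubblePass x).2 = 0) : (bubblePass x).1 = x := by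
  fun_induction bubblePass x with
  | case1 => rfl
  | case2 => rfl
  | case3 a b t hlt r ih => simp at h
  | case4 a b t hlt r ih =>
    have hr : r = bubblePass (b :: t) := rfl
    rw [hr] at h ⊢
    rw [ih h]

lemma bubblePass_zero_sorted (x : List Int) (h : (bubblePass x).2 = 0) : x.Pairwise (· ≤ ·) := by
  fun_induction bubblePass x with
  | case1 => simp
  | case2 => simp
  | case3 a b t hlt r ih => simp at h
  | case4 a b t hlt r ih =>
    have hr : r = bubblePass (b :: t) := rfl
    rw [hr] at h
    have hs := ih h
    have hab : a ≤ b := by omega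
    refine List.Pairwise.cons ?_ hs
    intro y hy
    rcases List.mem_cons.mp hy with rfl | hy'
    · exact hab
    · exact le_trans hab (List.rel_of_pairwise_cons hs hy')

lemma bubbleLoop_spec (f : Nat) (x : List Int) (h : invCount x < f) :
    (bubbleLoop f x).Perm x ∧ (bubbleLoop f x).Pairwise (· ≤ ·) := by
  induction f generalizing x with
  | zero => omega
  | succ f ih =>
    simp only [bubbleLoop]
    by_cases hk : 0 < (bubblePass x).2
    · have hinv := invCount_bubblePass x
      have hx := ih (bubblePass x).1 (by omega)
      rw [if_pos hk]
      exact ⟨hx.1.trans (bubblePass_perm x), hx.2⟩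
    · rw [if_neg hk]
      have h0 : (bubblePass x).2 = 0 := by omega
      rw [bubblePass_zero_eq x h0]
      exact ⟨List.Perm.refl x, bubblePass_zero_sorted x h0⟩

lemma zip_filter_slice (Z S : List Int) (v : Int) (hs : Z.Pairwise (· ≤ ·)) :
    ((Z.zip S).filter (fun p => v == p.1)).map Prod.snd
      = (S.drop (Z.countP (fun x => decide (x < v)))).take (Z.count v) := by
  induction Z generalizing S with
  | nil => simp
  | cons a t ih =>
    have ha : ∀ y ∈ t, a ≤ y := fun y hy => List.rel_of_pairwise_cons hs hy
    have hst : t.Pairwise (· ≤ ·) := hs.of_cons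
    cases S with
    | nil => simp
    | cons b T =>
      have key := ih T hst
      rcases lt_trichotomy a v with hav | hav | hav
      · have h1 : (v == a) = false := by simp; omega
        have h2 : (a == v) = false := by simp; omega
        simp only [List.zip_cons_cons, List.filter_cons, h1, Bool.false_eq_true, if_neg,
          not_false_eq_true, List.countP_cons, List.count_cons, h2,
          show decide (a < v) = true by simpa using hav, if_pos, List.drop_succ_cons]
        simpa using key
      · subst hav
        have h0 : t.countP (fun x => decide (x < a)) = 0 :=
          List.countP_eq_zero.mpr (fun y hy => by simpa using not_lt.mpr (ha y hy))
        simp only [List.zip_cons_cons, List.filter_cons, beq_self_eq_true, if_pos,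
          List.countP_cons, List.count_cons, h0, show decide (a < a) = false by simp]
        simp only [List.map_cons, key, h0]
        simp
      · have h1 : (v == a) = false := by simp; omega
        have h2 : (a == v) = false := by simp; omega
        have h0 : t.countP (fun x => decide (x < v)) = 0 :=
          List.countP_eq_zero.mpr (fun y hy => by have := ha y hy; simp; omega)
        have hcnt : t.count v = 0 :=
          List.count_eq_zero.mpr (fun hv => absurd (ha v hv) (by omega))
        simp only [List.zip_cons_cons, List.filter_cons, h1, Bool.false_eq_true, if_neg,
          not_false_eq_true, List.countP_cons, List.count_cons, h2, h0, hcnt,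
          show decide (a < v) = false by simp; omega]
        rw [key, h0, hcnt]
        simp

lemma map_range_getD (xs : List Int) (n : Nat) (h : n ≤ xs.length) :
    (List.range n).map (fun k => xs.getD k 0) = xs.take n := by
  induction xs generalizing n with
  | nil =>
    have : n = 0 := by simpa using h
    subst this; simp
  | cons a t ih =>
    cases n with
    | zero => simp
    | succ m =>
      rw [List.range_succ_eq_map]
      simp only [List.map_cons, List.map_map, List.getD_cons_zero, List.take_succ_cons]
      rw [show ((fun k => (a :: t).getD k 0) ∘ Nat.succ) = (fun k => t.getD k 0) by funext k; simp]
      rw [ih m (by simpa using h)]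

lemma range_getD_eq_zip (Z S : List Int) (v : Int) (hl : Z.length ≤ S.length) :
    ((List.range Z.length).filter (fun j => v == Z.getD j 0)).map (fun j => S.getD j 0)
      = ((Z.zip S).filter (fun p => v == p.1)).map Prod.snd := by
  induction Z generalizing S with
  | nil => simp
  | cons a t ih =>
    cases S with
    | nil => simp at hl
    | cons b T =>
      have key := ih T (by simpa using hl)
      rw [List.length_cons, List.range_succ_eq_map]
      rw [List.filter_cons, List.filter_map]
      rw [show ((fun j => v == (a :: t).getD j 0) ∘ Nat.succ) = (fun j => v == t.getD j 0) by
        funext k; simp]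
      by_cases hva : (v == a) = true
      · simp only [List.getD_cons_zero, hva, if_pos, List.map_cons, List.map_map]
        rw [show ((fun j => (b :: T).getD j 0) ∘ Nat.succ) = (fun j => T.getD j 0) by
          funext k; simp]
        rw [key]
        simp [hva]
      · simp only [List.getD_cons_zero, hva, Bool.false_eq_true, if_neg, not_false_eq_true,
          List.map_map]
        rw [show ((fun j => (b :: T).getD j 0) ∘ Nat.succ) = (fun j => T.getD j 0) by
          funext k; simp]
        rw [key]
        simp [hva]

lemma sortlist_perm (x : List Int) : (sortlist x).Perm x :=
  (bubbleLoop_spec _ x (Nat.lt_succ_self _)).1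

lemma sortlist_pairwise (x : List Int) : (sortlist x).Pairwise (· ≤ ·) :=
  (bubbleLoop_spec _ x (Nat.lt_succ_self _)).2

lemma sortlist_eq_sorted (x : List Int) : sortlist x = PySem.List.sorted x (fun y => y) false :=
  (PySem.List.sorted_id_eq_of_perm_of_pairwise x (sortlist x) (sortlist_perm x) (sortlist_pairwise x)).symm

lemma pyRange_map_getD (xs : List Int) (N : Int) (h0 : 0 ≤ N) (h : N ≤ xs.length) :
    (PySem.List.pyRange 0 N 1).map (fun i => PySem.List.pyGetD xs i 0) = xs.take N.toNat := by
  rw [PySem.List.pyRange_one, List.map_map, show (N - 0).toNat = N.toNat by simp]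
  rw [← map_range_getD xs N.toNat (by omega)]
  simp

lemma pyRange_flatMap_getD (xs : List Int) (N : Int) (G : Int → List Int) (h0 : 0 ≤ N)
    (h : N ≤ xs.length) :
    (PySem.List.pyRange 0 N 1).flatMap (fun i => G (PySem.List.pyGetD xs i 0))
      = (xs.take N.toNat).flatMap G := by
  rw [PySem.List.pyRange_one, List.flatMap_map, show (N - 0).toNat = N.toNat by simp]
  rw [← map_range_getD xs N.toNat (by omega), List.flatMap_map]
  simp

lemma pyRange_filter_map (Z S : List Int) (N : Int) (v : Int)
    (hn : N.toNat = Z.length) :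
    ((PySem.List.pyRange 0 N 1).filter (fun j => v == PySem.List.pyGetD Z j 0)).map
        (fun j => PySem.List.pyGetD S j 0)
      = ((List.range Z.length).filter (fun j => v == Z.getD j 0)).map (fun j => S.getD j 0) := by
  rw [PySem.List.pyRange_one, List.filter_map, List.map_map,
    show (N - 0).toNat = Z.length by simpa using hn]
  simp [Function.comp_def]

-- ===== VERDICT (by name: the statement is the Claim_ definition above) =====
theorem SynchronizingTables_spec : Claim_equal_SynchronizingTables := by
  intro N ids salary _hdom hpre
  obtain ⟨h0, hid, hsal⟩ := hpre
  show SynchronizingTables N ids salary = SynchronizingTables_alt N ids salary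
  have hidn : N.toNat ≤ ids.length := by omega
  have hsaln : N.toNat ≤ salary.length := by omega
  -- names for the shared data
  set P := ids.take N.toNat with hP
  set Z := sortlist P with hZ
  set S := sortlist salary with hS
  have hZperm : Z.Perm P := sortlist_perm P
  have hZlen : N.toNat = Z.length := by
    rw [hZperm.length_eq, hP, List.length_take]; omega
  have hZsort : Z.Pairwise (· ≤ ·) := sortlist_pairwise P
  have hSlen : N.toNat ≤ S.length := by rw [hS, (sortlist_perm salary).length_eq]; exact hsaln
  -- A-side: copy loop, then nested loops → flatMap of filtered maps
  rw [SynchronizingTables]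
  simp only [PySem.List.foldl_append_singleton_eq_map, List.nil_append]
  rw [pyRange_map_getD ids N h0 hid, ← hP, ← hZ]
  simp only [PySem.List.foldl_append_if]
  rw [PySem.List.foldl_append_eq_flatMap, List.nil_append, ← hS]
  rw [pyRange_flatMap_getD ids N
    (fun v => ((PySem.List.pyRange 0 N 1).filter (fun j => v == PySem.List.pyGetD Z j 0)).map
      (fun j => PySem.List.pyGetD S j 0)) h0 hid, ← hP]
  -- B-side
  rw [SynchronizingTables_alt]
  simp only [← sortlist_eq_sorted]
  rw [PySem.List.slice_to ids h0, ← hP, ← hS]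
  rw [PySem.List.foldl_append_eq_flatMap, List.nil_append]
  -- both are flatMaps over P; show the functions agree
  apply List.flatMap_congr
  intro v _
  rw [pyRange_filter_map Z S N v hZlen]
  rw [range_getD_eq_zip Z S v (by omega)]
  rw [zip_filter_slice Z S v hZsort]
  rw [PySem.List.slice_natCast_add]
  rw [hZperm.countP_congr (fun x _ => rfl), hZperm.count_eq v]
  rw [← List.countP_eq_length_filter, ← List.countP_eq_length_filter, List.count_eq_countP]
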